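-- pv_equiv track=rewrite | github.com/HotShot003/Data-Structure-Practice-Questions | Step1-Learn The Basics/Number Logics/NumberLogics48.py | is_EvilNumber
-- ===== SOURCE A (Python) =====
-- def binary(n):
--     i=0
--     list = []
--
--     while n:
--         if n%2 == 0:
--             list.append(0)
--         else:
--             list.append(1)
--         n = n//2
--         i+=1
--     list.reverse()
--     return list
--
-- def is_EvilNumber(s,e):
--
--     evil=[]
--
--     for num in range(s,e+1):
--
--         orgi = num
--         l = binary(num)
--         c=0
--         for i in l :
--             if i == 1:
--                 c+=1
--
--         if c%2 == 0:
--             evil.append(orgi)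
--     return evil
-- ===== SOURCE B (Python) =====
-- def is_EvilNumber(s, e):
--     if e < s:
--         return []
--     evil = []
--     p = bin(s).count('1') % 2   # parity of popcount(s), computed once
--     n = s
--     while n <= e:
--         if p == 0:
--             evil.append(n)
--         # incremental update: popcount(n+1) parity flips by (trailing ones of n) + 1
--         t = 1
--         m = n
--         while m % 2 == 1:
--             t += 1
--             m //= 2
--         p = (p + t) % 2
--         n += 1
--     return evil
-- ===== Notes on version B (the rewrite author's own statement) =====
-- stated objective: alternative
-- what changed: Instead of building each number's binary digit list and counting its 1-bits, B computes the popcount parity of s once and updates it incrementally along the range via the trailing-ones rule (popcount parity flips by trailing_ones(n)+1 from n to n+1), appending n whenever the running parity is even; intended as faster (O(e-s) amortized vs O((e-s) log e)), but a timing run's measurement was not consistent across inputs, so no speed is claimed.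
import Mathlib
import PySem

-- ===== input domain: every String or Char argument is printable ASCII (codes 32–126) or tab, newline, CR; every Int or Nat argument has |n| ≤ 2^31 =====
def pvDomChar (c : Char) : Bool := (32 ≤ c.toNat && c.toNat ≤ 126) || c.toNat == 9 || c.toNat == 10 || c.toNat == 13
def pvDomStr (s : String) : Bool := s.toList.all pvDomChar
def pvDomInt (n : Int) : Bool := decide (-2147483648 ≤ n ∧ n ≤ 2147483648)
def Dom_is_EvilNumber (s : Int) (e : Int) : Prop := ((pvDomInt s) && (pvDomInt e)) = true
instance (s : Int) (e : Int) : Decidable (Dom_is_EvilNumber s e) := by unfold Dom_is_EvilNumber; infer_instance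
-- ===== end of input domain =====

-- B replaces per-number binary expansion + bit count by a single incremental
-- popcount-parity update along the range (objective: alternative algorithm).


-- ===== PORT A =====
-- Python's `while n:` loop of `binary`, fuelled (the loop does not terminate for
-- n < 0; fuel n.natAbs + 1 covers every n ≥ 0, where it runs bitlength-many times).
def binaryFuel : Nat → Int → List Int → List Int
  | 0, _, acc => acc
  | fuel + 1, n, acc =>
    if n ≠ 0 then
      binaryFuel fuel (PySem.Int.floordiv n 2)
        (acc ++ [if PySem.Int.mod n 2 = 0 then (0 : Int) else 1])
    else acc

def binary (n : Int) : List Int := (binaryFuel (n.natAbs + 1) n []).reverse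

def is_EvilNumber (s : Int) (e : Int) : List Int :=
  (PySem.List.pyRange s (e + 1) 1).foldl
    (fun evil num =>
      let l := binary num
      let c := l.foldl (fun c i => if i == 1 then c + 1 else c) (0 : Int)
      if PySem.Int.mod c 2 = 0 then evil ++ [num] else evil)
    []

-- ===== PORT B =====
-- inner `while m % 2 == 1:` loop of Source B, fuelled (runs ≤ bitlength(m) times for m ≥ 0)
def trailFuel : Nat → Int → Int → Int
  | 0, _, t => t
  | fuel + 1, m, t =>
    if PySem.Int.mod m 2 = 1 then trailFuel fuel (PySem.Int.floordiv m 2) (t + 1)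
    else t

-- outer `while n <= e:` loop of Source B
def altLoop (e : Int) (n : Int) (p : Int) (evil : List Int) : List Int :=
  if _h : n ≤ e then
    altLoop e (n + 1) (PySem.Int.mod (p + trailFuel (n.natAbs + 1) n 1) 2)
      (if p = 0 then evil ++ [n] else evil)
  else evil
  termination_by (e + 1 - n).toNat
  decreasing_by omega

-- `bin(s).count('1')` = PySem.Int.bitCount s (popcount of |s|)
def is_EvilNumber_alt (s : Int) (e : Int) : List Int :=
  if e < s then []
  else altLoop e s (PySem.Int.mod ((PySem.Int.bitCount s : Nat) : Int) 2) []

-- ===== PRECONDITION & SPEC =====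
-- Pre_ excludes nothing A returns on: whenever range(s, e+1) contains a negative
-- number, A's `while n:` loop never terminates (n//2 stalls at -1), so A diverges.
def Pre_is_EvilNumber (s : Int) (e : Int) : Prop := 0 ≤ s ∨ e < s
instance (s : Int) (e : Int) : Decidable (Pre_is_EvilNumber s e) := by
  unfold Pre_is_EvilNumber; infer_instance

def pvWitness_is_EvilNumber : Int × Int := (0, 12)

def Spec_is_EvilNumber (s : Int) (e : Int) (out : List Int) : Prop := out = is_EvilNumber_alt s e
instance (s : Int) (e : Int) (out : List Int) : Decidable (Spec_is_EvilNumber s e out) := by unfold Spec_is_EvilNumber; infer_instance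

-- ===== CLAIM (what is proved, stated in full; the proofs are below) =====
def Claim_equal_is_EvilNumber : Prop := ∀ (s : Int) (e : Int), Dom_is_EvilNumber s e → Pre_is_EvilNumber s e → Spec_is_EvilNumber s e (is_EvilNumber s e)

-- ===== LEMMAS AND PROOFS =====

-- number of trailing 1-bits of a natural number
def trailOnes (m : Nat) : Nat :=
  if _h : m % 2 = 1 then trailOnes (m / 2) + 1 else 0
  termination_by m
  decreasing_by omega

-- reference list: the evil numbers of [n, e], front to back
def evilList (n e : Int) : List Int :=
  if _h : n ≤ e then
    (if PySem.Int.bitCount n % 2 = 0 then [n] else []) ++ evilList (n + 1) e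
  else []
  termination_by (e + 1 - n).toNat
  decreasing_by omega

theorem count_binaryFuel : ∀ (fuel : Nat) (m : Nat) (acc : List Int), m < fuel →
    (binaryFuel fuel (m : Int) acc).count 1 = acc.count 1 + PySem.Int.bitCount (m : Int) := by
  intro fuel
  induction fuel with
  | zero => intro m acc h; omega
  | succ f ih =>
    intro m acc h
    by_cases hm : m = 0
    · subst hm; simp [binaryFuel, PySem.Int.bitCount_zero]
    · have h2 : ((m : Int)) ≠ 0 := by exact_mod_cast hm
      rw [binaryFuel]
      simp only [h2, if_true, ne_eq, not_false_iff]
      have hfd : PySem.Int.floordiv (m:Int) 2 = ((m/2 : Nat) : Int) := by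
        exact_mod_cast PySem.Int.floordiv_natCast m 2
      have hmd : PySem.Int.mod (m:Int) 2 = ((m%2 : Nat) : Int) := by
        exact_mod_cast PySem.Int.mod_natCast m 2
      rw [hfd, hmd]
      rw [ih (m / 2) _ (by omega)]
      have hb := PySem.Int.bitCount_natCast (m := m) (by omega)
      rw [hb]
      by_cases hp : m % 2 = 0
      · simp [hp, List.count_append]
      · have hp1 : m % 2 = 1 := by omega
        simp [hp1, List.count_append]
        ring

theorem count_binary (m : Nat) :
    (binary (m : Int)).count 1 = PySem.Int.bitCount (m : Int) := by
  unfold binary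
  rw [List.count_reverse]
  have : ((m : Int)).natAbs = m := Int.natAbs_natCast m
  rw [this, count_binaryFuel (m + 1) m [] (by omega)]
  simp

theorem popc_succ (m : Nat) :
    PySem.Int.bitCount ((m + 1 : Nat) : Int) + trailOnes m = PySem.Int.bitCount (m : Int) + 1 := by
  induction m using Nat.strong_induction_on with
  | _ m ih =>
    by_cases hp : m % 2 = 1
    · have h1 : 0 < m := by omega
      rw [trailOnes]; simp only [hp, dif_pos]
      have hs : PySem.Int.bitCount ((m+1 : Nat) : Int) = (m+1) % 2 + PySem.Int.bitCount (((m+1)/2 : Nat) : Int) :=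
        PySem.Int.bitCount_natCast (m := m+1) (by omega)
      have hm : PySem.Int.bitCount ((m : Nat) : Int) = m % 2 + PySem.Int.bitCount ((m/2 : Nat) : Int) :=
        PySem.Int.bitCount_natCast (m := m) h1
      have hdiv : (m+1)/2 = m/2 + 1 := by omega
      have := ih (m/2) (by omega)
      rw [hs, hm, hdiv]
      omega
    · have hp0 : m % 2 = 0 := by omega
      rw [trailOnes]; simp only [hp, dif_neg, not_false_iff]
      have hs : PySem.Int.bitCount ((m+1 : Nat) : Int) = (m+1) % 2 + PySem.Int.bitCount (((m+1)/2 : Nat) : Int) :=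
        PySem.Int.bitCount_natCast (m := m+1) (by omega)
      by_cases hz : m = 0
      · subst hz; decide
      · have hm : PySem.Int.bitCount ((m : Nat) : Int) = m % 2 + PySem.Int.bitCount ((m/2 : Nat) : Int) :=
          PySem.Int.bitCount_natCast (m := m) (by omega)
        have hdiv : (m+1)/2 = m/2 := by omega
        rw [hs, hm, hdiv]
        omega

theorem trailFuel_eq : ∀ (fuel : Nat) (m : Nat) (t : Int), m < fuel →
    trailFuel fuel (m : Int) t = t + (trailOnes m : Int) := by
  intro fuel
  induction fuel with
  | zero => intro m t h; omega
  | succ f ih =>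
    intro m t h
    have hmd : PySem.Int.mod (m:Int) 2 = ((m%2 : Nat) : Int) := by
      exact_mod_cast PySem.Int.mod_natCast m 2
    have hfd : PySem.Int.floordiv (m:Int) 2 = ((m/2 : Nat) : Int) := by
      exact_mod_cast PySem.Int.floordiv_natCast m 2
    rw [trailFuel, hmd, hfd, trailOnes]
    by_cases hp : m % 2 = 1
    · simp only [hp, dif_pos]
      rw [if_pos (show ((1:Nat):Int) = 1 by norm_num)]
      rw [ih (m/2) (t+1) (by omega)]
      push_cast; ring
    · simp only [hp, dif_neg, not_false_iff]
      rw [if_neg (show ¬ ((m % 2 :Nat):Int) = 1 by exact_mod_cast hp)]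
      simp

-- the body of A's range loop, as it acts on one number n ≥ 0
theorem stepA_eq (acc : List Int) (n : Int) (hn : 0 ≤ n) :
    (let l := binary n
     let c := l.foldl (fun c i => if i == 1 then c + 1 else c) (0 : Int)
     if PySem.Int.mod c 2 = 0 then acc ++ [n] else acc)
    = if PySem.Int.bitCount n % 2 = 0 then acc ++ [n] else acc := by
  simp only
  rw [PySem.List.foldl_beq_add_one (binary n) 1 0]
  obtain ⟨m, rfl⟩ := Int.eq_ofNat_of_zero_le hn
  rw [count_binary m]
  have hmd : PySem.Int.mod (0 + ((PySem.Int.bitCount (m:Int) : Nat) : Int)) 2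
      = ((PySem.Int.bitCount (m:Int) % 2 : Nat) : Int) := by
    rw [zero_add]
    exact_mod_cast PySem.Int.mod_natCast (PySem.Int.bitCount (m:Int)) 2
  rw [hmd]
  by_cases hp : PySem.Int.bitCount (m:Int) % 2 = 0
  · rw [if_pos (by exact_mod_cast hp), if_pos hp]
  · rw [if_neg (by exact_mod_cast hp), if_neg hp]

theorem foldA_eq : ∀ (k : Nat) (n e : Int), 0 ≤ n → k = (e + 1 - n).toNat →
    ∀ acc : List Int,
    (PySem.List.pyRange n (e + 1) 1).foldl
      (fun evil num =>
        let l := binary num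
        let c := l.foldl (fun c i => if i == 1 then c + 1 else c) (0 : Int)
        if PySem.Int.mod c 2 = 0 then evil ++ [num] else evil) acc
      = acc ++ evilList n e := by
  intro k
  induction k with
  | zero =>
    intro n e hn hk acc
    rw [PySem.List.pyRange_one_eq_nil (by omega), evilList]
    rw [dif_neg (by omega)]
    simp
  | succ k ih =>
    intro n e hn hk acc
    have hne : n ≤ e := by omega
    rw [PySem.List.pyRange_one_cons (by omega), List.foldl_cons, stepA_eq acc n hn]
    rw [ih (n+1) e (by omega) (by omega)]
    conv_rhs => rw [evilList]
    rw [dif_pos hne]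
    by_cases hp : PySem.Int.bitCount n % 2 = 0
    · rw [if_pos hp, if_pos hp]; simp
    · rw [if_neg hp, if_neg hp]; simp

theorem altLoop_eq : ∀ (k : Nat) (n e : Int), 0 ≤ n → k = (e + 1 - n).toNat →
    ∀ evil : List Int,
    altLoop e n ((PySem.Int.bitCount n % 2 : Nat) : Int) evil = evil ++ evilList n e := by
  intro k
  induction k with
  | zero =>
    intro n e hn hk evil
    rw [altLoop, dif_neg (by omega), evilList, dif_neg (by omega)]
    simp
  | succ k ih =>
    intro n e hn hk evil
    have hne : n ≤ e := by omega
    obtain ⟨m, rfl⟩ := Int.eq_ofNat_of_zero_le hn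
    rw [altLoop, dif_pos hne]
    have hna : ((m:Int)).natAbs = m := Int.natAbs_natCast m
    rw [hna, trailFuel_eq (m + 1) m 1 (by omega)]
    have hparity : PySem.Int.mod (((PySem.Int.bitCount (m:Int) % 2 : Nat) : Int) + (1 + (trailOnes m : Int))) 2
        = ((PySem.Int.bitCount ((m:Int) + 1) % 2 : Nat) : Int) := by
      have h1 : ((PySem.Int.bitCount (m:Int) % 2 : Nat) : Int) + (1 + (trailOnes m : Int))
          = (((PySem.Int.bitCount (m:Int) % 2 + 1 + trailOnes m : Nat)) : Int) := by push_cast; ring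
      rw [h1]
      have h2 : PySem.Int.mod (((PySem.Int.bitCount (m:Int) % 2 + 1 + trailOnes m : Nat)) : Int) 2
          = (((PySem.Int.bitCount (m:Int) % 2 + 1 + trailOnes m) % 2 : Nat) : Int) := by
        exact_mod_cast PySem.Int.mod_natCast (PySem.Int.bitCount (m:Int) % 2 + 1 + trailOnes m) 2
      rw [h2]
      have h3 := popc_succ m
      have h4 : ((m:Int) + 1) = ((m + 1 : Nat) : Int) := by push_cast; ring
      rw [h4]
      congr 1
      omega
    rw [hparity]
    have h5 : ((m:Int) + 1) = ((m + 1 : Nat) : Int) := by push_cast; ring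
    rw [h5, ih ((m+1 : Nat) : Int) e (by positivity) (by omega)]
    conv_rhs => rw [evilList]
    rw [dif_pos hne]
    by_cases hp : PySem.Int.bitCount (m:Int) % 2 = 0
    · rw [if_pos (by exact_mod_cast hp), if_pos hp]
      rw [← h5]; simp
    · rw [if_neg (by exact_mod_cast hp), if_neg hp]
      rw [← h5]; simp

-- ===== VERDICT (by name: the statement is the Claim_ definition above) =====
theorem is_EvilNumber_spec : Claim_equal_is_EvilNumber := by
  intro s e _hdom hpre
  unfold Spec_is_EvilNumber is_EvilNumber is_EvilNumber_alt
  by_cases hlt : e < s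
  · rw [if_pos hlt, PySem.List.pyRange_one_eq_nil (by omega)]
    rfl
  · have hs : 0 ≤ s := by
      rcases hpre with h | h
      · exact h
      · exact absurd h hlt
    rw [if_neg hlt]
    have hmd : PySem.Int.mod ((PySem.Int.bitCount s : Nat) : Int) 2
        = ((PySem.Int.bitCount s % 2 : Nat) : Int) := by
      exact_mod_cast PySem.Int.mod_natCast (PySem.Int.bitCount s) 2
    rw [hmd, altLoop_eq ((e + 1 - s).toNat) s e hs rfl []]
    rw [foldA_eq ((e + 1 - s).toNat) s e hs rfl []]
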